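-- pv_equiv track=rewrite | github.com/AaronAshery/Multivariable-Math-Calculators | MathConferenceAaronAshery/LineOfBestFit.py | getA
-- ===== SOURCE A (Python) =====
-- def getA(A):
--     B = []
--     C = []
--     m = countRows(A)
--     for i in range(m):
--         B.append(1)
--     C.append(B)
--     B = []
--     for row in A:
--         B.append(row[0])
--     C.append(B)
--     C = transpose(C)
--     return C
--
-- def transpose(A):
--     n = countColumns(A)
--     m = countRows(A)
--     B = []
--     C = []
--     for i in range(n):
--         for row in A:
--             B.append(row[i])
--         C.append(B)
--         B = []
--     return C
--
-- def countRows(A):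
--     numRows = 0
--     if isinstance(A[0],list) == False:
--         numRows = 1
--     else:
--         for row in A:
--             numRows += 1
--     return numRows
--
-- def countColumns(A):
--     if isinstance(A[0], list) == False:
--         counter = 0
--         for num in A:
--             counter += 1
--         numColumns = counter
--     else:
--         numColumns = len(A[0])
--     return numColumns
-- ===== SOURCE B (Python) =====
-- def getA(A):
--     # row-major construction: one [1, row[0]] row per input row
--     return [[1, row[0]] for row in A]
-- ===== Notes on version B (the rewrite author's own statement) =====
-- stated objective: simpler
-- what changed: Builds the design matrix directly row-major as [[1, row[0]] for row in A] instead of assembling two column lists and transposing them through countRows/countColumns.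
import Mathlib
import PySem

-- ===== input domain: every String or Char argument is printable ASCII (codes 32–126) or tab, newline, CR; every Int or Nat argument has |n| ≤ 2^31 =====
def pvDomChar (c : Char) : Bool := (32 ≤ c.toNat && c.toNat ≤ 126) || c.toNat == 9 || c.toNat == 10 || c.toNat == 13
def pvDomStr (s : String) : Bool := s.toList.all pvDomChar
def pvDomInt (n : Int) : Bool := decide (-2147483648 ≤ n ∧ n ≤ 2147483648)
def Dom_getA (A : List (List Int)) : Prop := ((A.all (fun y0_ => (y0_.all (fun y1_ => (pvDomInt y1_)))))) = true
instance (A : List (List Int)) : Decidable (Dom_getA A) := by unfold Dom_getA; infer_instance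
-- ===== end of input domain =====

-- B builds the design matrix row-major as [[1, row[0]] for row in A] instead of
-- assembling two column lists and transposing them (simpler decomposition).


-- ===== PORT A =====
-- countRows: isinstance(A[0], list) is always True for this type (the A[0] access on
-- empty A raises IndexError in Python — excluded by Pre_getA), so the else branch runs.
def pvCountRows (A : List (List Int)) : Int :=
  A.foldl (fun numRows _ => numRows + 1) 0

-- countColumns: A[0] is a list here, so numColumns = len(A[0]).
def pvCountColumns (A : List (List Int)) : Int :=
  ((PySem.List.pyGetD A 0 []).length : Int)

def pvTranspose (A : List (List Int)) : List (List Int) :=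
  let n := pvCountColumns A
  let _m := pvCountRows A
  (PySem.List.pyRange 0 n 1).foldl
    (fun C i => C ++ [A.foldl (fun B row => B ++ [PySem.List.pyGetD row i 0]) []]) []

def getA (A : List (List Int)) : List (List Int) :=
  let m := pvCountRows A
  let B1 := (PySem.List.pyRange 0 m 1).foldl (fun B _ => B ++ [(1 : Int)]) []
  let B2 := A.foldl (fun B row => B ++ [PySem.List.pyGetD row 0 0]) []
  pvTranspose ([B1] ++ [B2])

-- ===== PORT B =====
def getA_alt (A : List (List Int)) : List (List Int) :=
  A.map (fun row => [1, PySem.List.pyGetD row 0 0])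

-- ===== PRECONDITION & SPEC =====
-- Pre_ excludes exactly the inputs where Python A raises IndexError:
-- empty A (countRows reads A[0]) and any empty row (row[0]).
def Pre_getA (A : List (List Int)) : Prop := A ≠ [] ∧ ∀ row ∈ A, row ≠ []
instance (A : List (List Int)) : Decidable (Pre_getA A) := by unfold Pre_getA; infer_instance
def pvWitness_getA : List (List Int) := [[3, 4], [5]]

def Spec_getA (A : List (List Int)) (out : List (List Int)) : Prop := out = getA_alt A
instance (A : List (List Int)) (out : List (List Int)) : Decidable (Spec_getA A out) := by unfold Spec_getA; infer_instance

-- ===== CLAIM (what is proved, stated in full; the proofs are below) =====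
def Claim_equal_getA : Prop := ∀ (A : List (List Int)), Dom_getA A → Pre_getA A → Spec_getA A (getA A)

-- ===== LEMMAS AND PROOFS =====

theorem foldl_count_acc (A : List (List Int)) (a : Int) :
    A.foldl (fun numRows _ => numRows + 1) a = a + (A.length : Int) := by
  induction A generalizing a with
  | nil => simp
  | cons x xs ih => simp [ih]; ring

theorem pvCountRows_eq (A : List (List Int)) : pvCountRows A = (A.length : Int) := by
  unfold pvCountRows
  simp [foldl_count_acc]

theorem getA_eq_alt (A : List (List Int)) : getA A = getA_alt A := by
  unfold getA getA_alt pvTranspose pvCountColumns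
  rw [pvCountRows_eq]
  simp only [PySem.List.foldl_append_singleton_eq_map, List.nil_append,
    PySem.List.pyRange_zero_natCast, PySem.List.pyGetD_ofNat', List.singleton_append,
    List.getD_cons_zero, List.length_map, List.length_range]
  apply List.ext_getElem
  · simp
  · intro i h1 h2
    simp only [List.length_map] at h2
    simp [PySem.List.pyGetD_natCast, List.getD_eq_getElem?_getD, h2]

-- ===== VERDICT (by name: the statement is the Claim_ definition above) =====
theorem getA_spec : Claim_equal_getA := by
  intro A _ _
  exact getA_eq_alt A
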